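-- pv_equiv track=rewrite | github.com/passlab-sec/tattlenet | tattlenet.py | enumerate_ip_range
-- ===== SOURCE A (Python) =====
-- def enumerate_ip_range (range, pref=''):
--     """ Enumerates a list struture produced by `expand_ip`.
--     Args:
--         range (list of list of int): The enumerable list structure
--         pref (str): The current prefix (used for recursion)
--     Return:
--         list of str: The enumerated list of IP addresses
--     """
--     separator = '' if pref == '' else '.' # Determine necessary separator.
--     if len(range) == 0:
--         return [pref] # Base case, just return prefix.
--     ips = []
--     for octet in range[0]:
--         # Make recursive call.
--         ips.extend(enumerate_ip_range(range[1:], pref + separator + str(octet)))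
--     return ips
-- ===== SOURCE B (Python) =====
-- def enumerate_ip_range(range, pref=''):
--     # Iteratively build all octet combinations (Cartesian product, left-slowest
--     # order), then render each combination as an IP string in one pass.
--     combos = [[]]
--     for octets in range:
--         combos = [c + [o] for c in combos for o in octets]
--     result = []
--     for c in combos:
--         if c:
--             result.append(pref + ('.' if pref else '') + '.'.join(str(o) for o in c))
--         else:
--             result.append(pref)
--     return result
-- ===== Notes on version B (the rewrite author's own statement) =====
-- stated objective: idiomatic
-- what changed: Replaces A's recursion-with-extend by an iterative Cartesian-product build over the octet lists followed by a single rendering pass using '.'-join.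
import Mathlib
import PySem

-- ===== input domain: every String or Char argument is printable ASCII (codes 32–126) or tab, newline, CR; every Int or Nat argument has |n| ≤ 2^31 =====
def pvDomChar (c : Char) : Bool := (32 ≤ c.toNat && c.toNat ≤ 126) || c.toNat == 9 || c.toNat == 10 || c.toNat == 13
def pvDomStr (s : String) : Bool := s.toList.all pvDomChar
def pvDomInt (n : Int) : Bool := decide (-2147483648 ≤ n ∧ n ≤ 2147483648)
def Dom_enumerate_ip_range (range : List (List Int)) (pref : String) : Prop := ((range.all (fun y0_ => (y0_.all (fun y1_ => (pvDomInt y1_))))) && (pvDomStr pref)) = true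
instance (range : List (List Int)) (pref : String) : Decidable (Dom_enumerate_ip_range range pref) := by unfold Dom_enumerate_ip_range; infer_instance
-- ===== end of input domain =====

-- B replaces A's recursion by an iterative Cartesian-product pass plus a single
-- rendering pass with '.'-join (objective: idiomatic, same asymptotic cost).

-- ===== PORT A =====
def enumerate_ip_range (range : List (List Int)) (pref : String) : List String :=
  let separator : String := if pref == "" then "" else "."
  match range with
  | [] => [pref]
  | r0 :: rest =>
      r0.foldl (fun ips octet =>
        ips ++ enumerate_ip_range rest (pref ++ separator ++ PySem.Int.toStr octet)) ([] : List String)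

-- ===== PORT B =====
def enumerate_ip_range_alt (range : List (List Int)) (pref : String) : List String :=
  let combos := range.foldl
    (fun combos octets => combos.flatMap (fun c => octets.map (fun o => c ++ [o])))
    [([] : List Int)]
  combos.map (fun c =>
    if !c.isEmpty then
      pref ++ (if pref == "" then "" else ".") ++ PySem.Str.join "." (c.map PySem.Int.toStr)
    else pref)

-- ===== PRECONDITION & SPEC =====
def Spec_enumerate_ip_range (range : List (List Int)) (pref : String) (out : List String) : Prop := out = enumerate_ip_range_alt range pref
instance (range : List (List Int)) (pref : String) (out : List String) : Decidable (Spec_enumerate_ip_range range pref out) := by unfold Spec_enumerate_ip_range; infer_instance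

-- ===== CLAIM (what is proved, stated in full; the proofs are below) =====
def Claim_equal_enumerate_ip_range : Prop := ∀ (range : List (List Int)) (pref : String), Dom_enumerate_ip_range range pref → Spec_enumerate_ip_range range pref (enumerate_ip_range range pref)

-- ===== LEMMAS AND PROOFS =====

-- the right-recursive Cartesian product both programs enumerate
def prodR : List (List Int) → List (List Int)
  | [] => [[]]
  | r0 :: rest => r0.flatMap (fun o => (prodR rest).map (fun d => o :: d))

def sepOf (pref : String) : String := if pref == "" then "" else "."

def glue (pref : String) (c : List Int) : String :=
  if c.isEmpty then pref
  else pref ++ sepOf pref ++ PySem.Str.join "." (c.map PySem.Int.toStr)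

lemma toDigitsCore_len (b f n : Nat) (l : List Char) :
    l.length ≤ (Nat.toDigitsCore b f n l).length := by
  induction f generalizing n l with
  | zero => simp [Nat.toDigitsCore]
  | succ f ih =>
    rw [Nat.toDigitsCore]
    by_cases h : n / b = 0
    · simp [h]
    · simp only [h]
      calc l.length ≤ (Nat.digitChar (n % b) :: l).length := by simp
        _ ≤ _ := ih _ _

lemma toDigits_ne_nil (b n : Nat) : Nat.toDigits b n ≠ [] := by
  intro hc
  have h1 : 1 ≤ (Nat.toDigits b n).length := by
    rw [Nat.toDigits, Nat.toDigitsCore]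
    by_cases h : n / b = 0
    · simp [h]
    · simp only [h]
      have := toDigitsCore_len b n (n / b) (Nat.digitChar (n % b) :: [])
      simpa using le_trans (by simp) this
  simp [hc] at h1

lemma toStr_ne_empty (s : String) (n : Int) : ¬ (s ++ PySem.Int.toStr n = "") := by
  intro h
  have h2 := congrArg String.toList h
  simp [String.toList_append, PySem.Int.toList_toStr, PySem.Int.toChars] at h2
  rcases h2 with ⟨_, h3⟩
  split at h3 <;> simp_all [toDigits_ne_nil]

lemma join_single (p : String) : PySem.Str.join "." [p] = p := by
  unfold PySem.Str.join
  simp [PySem.Chars.join_singleton, String.ofList_toList]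

lemma join_cons (p q : String) (rest : List String) :
    PySem.Str.join "." (p :: q :: rest) = p ++ "." ++ PySem.Str.join "." (q :: rest) := by
  unfold PySem.Str.join
  have hdot : ∀ xs : List Char, String.ofList ('.' :: xs) = "." ++ String.ofList xs := by
    intro xs
    have h : ('.' :: xs) = ".".toList ++ xs := by simp
    rw [h, String.ofList_append, String.ofList_toList]
  simp only [List.map_cons]
  rw [PySem.Chars.join_cons_cons]
  simp [String.ofList_append, String.ofList_toList, hdot, String.append_assoc]

lemma glue_shift (pref : String) (o : Int) (d : List Int) :
    glue (pref ++ sepOf pref ++ PySem.Int.toStr o) d = glue pref (o :: d) := by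
  cases d with
  | nil => simp [glue, join_single]
  | cons e d' =>
    have hne : ¬ ((pref ++ if pref = "" then "" else ".") ++ PySem.Int.toStr o = "") :=
      toStr_ne_empty _ o
    simp only [glue, sepOf, List.isEmpty_cons, Bool.false_eq_true, if_false,
      List.map_cons, beq_iff_eq]
    rw [if_neg hne, join_cons]
    simp [String.append_assoc]

lemma A_char (l : List (List Int)) (pref : String) :
    enumerate_ip_range l pref = (prodR l).map (glue pref) := by
  induction l generalizing pref with
  | nil => simp [enumerate_ip_range, prodR, glue]
  | cons r0 rest ih =>
    simp only [enumerate_ip_range]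
    rw [PySem.List.foldl_append_eq_flatMap]
    simp only [List.nil_append]
    have : ∀ o : Int,
        enumerate_ip_range rest (pref ++ (if pref == "" then "" else ".") ++ PySem.Int.toStr o)
        = (prodR rest).map (fun d => glue pref (o :: d)) := by
      intro o
      rw [ih]
      have := glue_shift pref o
      simp only [sepOf] at this
      exact List.map_congr_left (fun d _ => this d)
    simp only [this, prodR, List.map_flatMap, List.map_map, Function.comp_def]

lemma foldl_prod (l : List (List Int)) (acc : List (List Int)) :
    l.foldl (fun cs octets => cs.flatMap (fun c => octets.map (fun o => c ++ [o]))) acc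
    = acc.flatMap (fun c => (prodR l).map (fun d => c ++ d)) := by
  induction l generalizing acc with
  | nil => simp [prodR]
  | cons r0 rest ih =>
    rw [List.foldl_cons, ih]
    simp [prodR, List.flatMap_assoc, List.map_flatMap, List.flatMap_map, List.map_map,
      Function.comp_def, List.append_assoc]

lemma B_char (l : List (List Int)) (pref : String) :
    enumerate_ip_range_alt l pref = (prodR l).map (glue pref) := by
  simp only [enumerate_ip_range_alt]
  rw [foldl_prod]
  simp only [List.flatMap_cons, List.flatMap_nil, List.append_nil, List.nil_append,
    List.map_id']
  refine List.map_congr_left (fun c _ => ?_)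
  cases c <;> simp [glue, sepOf]

-- ===== VERDICT (by name: the statement is the Claim_ definition above) =====
theorem enumerate_ip_range_spec : Claim_equal_enumerate_ip_range := by
  intro range pref _
  unfold Spec_enumerate_ip_range
  rw [A_char, B_char]
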